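-- pv_equiv track=rewrite | github.com/sergiutoader/Coursework | Formal Languages and Automata - THIRD YEAR/Boyer-Moore String Parser/main.py | get_longest_suffix
-- ===== SOURCE A (Python) =====
-- def get_longest_suffix(string, pattern):
--
-- 	# nu are rost sa inceapa cautarea de la inceputul string-ului, ci de la len(string) - len(pattern)
-- 	start = 0
-- 	if len(string) > len(pattern):
-- 		start = len(string) - len(pattern)
--
-- 	# subsirul in care se cauta sufixul
-- 	# practic, ultimele len(pattern) caractere din string se verifica
-- 	search_str = string[start:]
--
-- 	# verificare daca ultimul caracter se afla in pattern
-- 	# se evita astfel comparatii redundante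
-- 	if not search_str[len(search_str) - 1] in pattern:
-- 		return 0
--
-- 	# prin prelucrarile anterioare, ne asiguram ca realizam maxim len(pattern) cautari
-- 	# se calculeaza cel mai lung sufix din string care face match pe pattern
-- 	for i in range(len(search_str)):
-- 		# comparatie sufixe de dimensiune len(search_str), len(search_str ) - 1, ... din
-- 		# string cu prefixe de aceeasi lungime din pattern
-- 		if search_str[i:] == pattern[:len(search_str[i:])]:
-- 			# pentru prima potrivire gasita, se intoarce lungimea
-- 			return len(search_str) - i
-- 	return 0
-- ===== SOURCE B (Python) =====
-- def get_longest_suffix(string, pattern):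
--     # Exact rolling encodings (base-257 big integers, no modulus): one loop walks
--     # k = 1..m, extending the pattern-prefix encoding forward and the string-suffix
--     # encoding backward, and keeps the largest k on which the two encodings agree.
--     m = min(len(string), len(pattern))
--     s = string[len(string) - m:]
--     best = 0
--     h = 0
--     acc = 0
--     p = 1
--     for k in range(1, m + 1):
--         h = h * 257 + ord(pattern[k - 1])
--         acc = ord(s[m - k]) * p + acc
--         p *= 257
--         if acc == h:
--             best = k
--     return best
-- ===== Notes on version B (the rewrite author's own statement) =====
-- stated objective: alternative
-- what changed: Replaces A's repeated slice-vs-prefix comparisons by exact base-257 big-integer encodings: a single loop over k = 1..m extends the pattern-prefix encoding forward and the string-suffix encoding backward and keeps the largest k on which the two encodings agree.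
import Mathlib
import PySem

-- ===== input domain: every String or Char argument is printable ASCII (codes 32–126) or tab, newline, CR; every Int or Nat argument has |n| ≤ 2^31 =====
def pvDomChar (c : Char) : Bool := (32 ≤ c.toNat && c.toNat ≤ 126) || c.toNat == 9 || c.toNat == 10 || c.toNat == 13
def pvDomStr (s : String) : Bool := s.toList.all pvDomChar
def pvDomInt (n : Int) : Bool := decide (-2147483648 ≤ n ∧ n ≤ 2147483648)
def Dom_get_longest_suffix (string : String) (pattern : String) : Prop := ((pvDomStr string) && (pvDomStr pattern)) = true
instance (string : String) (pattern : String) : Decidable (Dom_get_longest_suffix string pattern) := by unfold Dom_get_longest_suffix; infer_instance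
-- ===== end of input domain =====

-- B replaces A's repeated slice-vs-prefix comparisons by exact base-257 big-integer
-- encodings (one forward pass over the pattern, one backward pass over the string's
-- tail); objective: alternative algorithm, not claimed faster.

-- ===== PORT A =====
-- the for-loop of A with its early return, over the index list of range(len(search_str))
def pvALoop (search p : List Char) : List Int → Int
  | [] => 0
  | i :: rest =>
      let suf := PySem.List.slice search (some i) none
      if suf = PySem.List.slice p none (some (suf.length : Int)) then
        (search.length : Int) - i
      else pvALoop search p rest

def get_longest_suffix (string : String) (pattern : String) : Int :=
  let s := string.toList
  let p := pattern.toList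
  let start : Int := if (s.length : Int) > (p.length : Int) then (s.length : Int) - (p.length : Int) else 0
  let search := PySem.List.slice s (some start) none
  match PySem.List.pyGet? search ((search.length : Int) - 1) with
  | none => 0   -- IndexError in Python (empty search_str); excluded by Pre_
  | some c =>
      -- Python's `c in pattern` for the single character c is exactly list membership
      if (decide (c ∈ p)) = false then 0
      else pvALoop search p (PySem.List.pyRange 0 (search.length : Int) 1)

-- ===== PORT B =====
def get_longest_suffix_alt (string : String) (pattern : String) : Int :=
  let sl := string.toList
  let pl := pattern.toList
  let m := min sl.length pl.length
  let s := PySem.List.slice sl (some ((sl.length : Int) - (m : Int))) none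
  -- pattern[k-1] and s[m-k] are always in range in this loop, so pyGetD is exact;
  -- best is k itself (k ≥ 1 > 0, so Int.toNat is exact)
  let st := (PySem.List.pyRange 1 ((m : Int) + 1) 1).foldl
      (fun (st : Nat × Nat × Nat × Nat) k =>
        let h := st.2.1 * 257 + (PySem.List.pyGetD pl (k - 1) ' ').toNat
        let acc := (PySem.List.pyGetD s ((m : Int) - k) ' ').toNat * st.2.2.2 + st.2.2.1
        let best := if acc = h then k.toNat else st.1
        (best, h, acc, st.2.2.2 * 257)) (0, 0, 0, 1)
  (st.1 : Int)

-- ===== PRECONDITION & SPEC =====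
-- A indexes search_str[-1], which raises IndexError exactly when string or pattern is empty
def Pre_get_longest_suffix (string : String) (pattern : String) : Prop :=
  string ≠ "" ∧ pattern ≠ ""
instance (string : String) (pattern : String) : Decidable (Pre_get_longest_suffix string pattern) := by
  unfold Pre_get_longest_suffix; infer_instance
def pvWitness_get_longest_suffix : String × String := ("xyzab", "abq")

def Spec_get_longest_suffix (string : String) (pattern : String) (out : Int) : Prop :=
  out = get_longest_suffix_alt string pattern
instance (string : String) (pattern : String) (out : Int) : Decidable (Spec_get_longest_suffix string pattern out) := by
  unfold Spec_get_longest_suffix; infer_instance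

-- ===== CLAIM (what is proved, stated in full; the proofs are below) =====
def Claim_equal_get_longest_suffix : Prop := ∀ (string : String) (pattern : String), Dom_get_longest_suffix string pattern → Pre_get_longest_suffix string pattern → Spec_get_longest_suffix string pattern (get_longest_suffix string pattern)

-- ===== LEMMAS AND PROOFS =====

-- base-257 encoding of a character list (what B's two hash loops compute)
def pvEnc (l : List Char) : Nat := l.foldl (fun h c => h * 257 + c.toNat) 0

theorem pvEnc_from (l : List Char) (h : Nat) :
    l.foldl (fun h c => h * 257 + c.toNat) h = h * 257 ^ l.length + pvEnc l := by
  induction l generalizing h with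
  | nil => simp [pvEnc]
  | cons c t ih =>
      simp only [List.foldl_cons, List.length_cons, pvEnc]
      rw [ih (h * 257 + c.toNat), ih (0 * 257 + c.toNat)]
      ring

theorem pvEnc_cons (c : Char) (l : List Char) :
    pvEnc (c :: l) = c.toNat * 257 ^ l.length + pvEnc l := by
  simp only [pvEnc, List.foldl_cons]
  rw [pvEnc_from]
  simp [pvEnc]

theorem pvEnc_snoc (l : List Char) (c : Char) :
    pvEnc (l ++ [c]) = pvEnc l * 257 + c.toNat := by
  simp [pvEnc, List.foldl_append]

theorem pvEnc_inj (l1 l2 : List Char) (hlen : l1.length = l2.length)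
    (h1 : ∀ c ∈ l1, c.toNat < 257) (h2 : ∀ c ∈ l2, c.toNat < 257)
    (he : pvEnc l1 = pvEnc l2) : l1 = l2 := by
  induction l1 using List.reverseRecOn generalizing l2 with
  | nil => cases l2 using List.reverseRecOn with
    | nil => rfl
    | append_singleton t c => simp at hlen
  | append_singleton t1 c1 ih =>
      cases l2 using List.reverseRecOn with
      | nil => simp at hlen
      | append_singleton t2 c2 =>
          rw [pvEnc_snoc, pvEnc_snoc] at he
          have hc1 : c1.toNat < 257 := h1 c1 (by simp)
          have hc2 : c2.toNat < 257 := h2 c2 (by simp)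
          have hcc : c1.toNat = c2.toNat ∧ pvEnc t1 = pvEnc t2 := by omega
          have : c1 = c2 := by
            have h := hcc.1; unfold Char.toNat at h
            exact Char.ext (UInt32.toNat_inj.mp h)
          subst this
          have : t1 = t2 := by
            refine ih t2 ?_ (fun c hc => h1 c (by simp [hc])) (fun c hc => h2 c (by simp [hc])) hcc.2
            simpa using hlen
          rw [this]

theorem pv_find?_congr {α : Type} (L : List α) (p q : α → Bool)
    (h : ∀ x ∈ L, p x = q x) : L.find? p = L.find? q := by
  induction L with
  | nil => rfl
  | cons a t ih =>
      simp only [List.find?]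
      rw [h a (by simp)]
      cases q a
      · exact ih (fun x hx => h x (by simp [hx]))
      · rfl

theorem pv_last_eq_find (Q : Nat → Prop) [inst : DecidablePred Q] (L : List Nat) (d : Nat) :
    L.foldl (fun b k => if Q k then k else b) d = (L.reverse.find? (fun k => decide (Q k))).getD d := by
  induction L generalizing d with
  | nil => simp
  | cons a t ih =>
      simp only [List.foldl_cons, List.reverse_cons]
      rw [ih, List.find?_append]
      cases hf : t.reverse.find? (fun k => decide (Q k)) with
      | some v => simp
      | none => by_cases hq : Q a <;> simp [List.find?, hq]

theorem pv_range'_reverse (m : Nat) :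
    (List.range' 1 m).reverse = (List.range m).map (fun j => m - j) := by
  induction m with
  | zero => simp
  | succ n ih =>
      rw [List.range'_1_concat, List.range_succ_eq_map]
      simp only [List.reverse_append, List.reverse_singleton, List.map_cons, List.singleton_append]
      refine List.cons_eq_cons.mpr ⟨by omega, ?_⟩
      rw [ih, List.map_map]
      apply List.map_congr_left
      intro j hj; simp only [Function.comp_apply]; omega


-- B's single loop: after k = 1..n it carries both rolling encodings and the best match
theorem pvB_fold (srch pl : List Char) (m : Nat) (hsr : srch.length = m) (hmp : m ≤ pl.length) :
    ∀ n, n ≤ m →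
      ((List.range' 1 n).map (fun (j : Nat) => (j : Int))).foldl
        (fun (st : Nat × Nat × Nat × Nat) k =>
          let h := st.2.1 * 257 + (PySem.List.pyGetD pl (k - 1) ' ').toNat
          let acc := (PySem.List.pyGetD srch ((m : Int) - k) ' ').toNat * st.2.2.2 + st.2.2.1
          let best := if acc = h then k.toNat else st.1
          (best, h, acc, st.2.2.2 * 257)) (0, 0, 0, 1)
      = ((List.range' 1 n).foldl
           (fun b k => if pvEnc (srch.drop (m - k)) = pvEnc (pl.take k) then k else b) 0,
         pvEnc (pl.take n), pvEnc (srch.drop (m - n)), 257 ^ n) := by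
  intro n
  induction n with
  | zero => intro _; subst hsr; simp [pvEnc]
  | succ n ih =>
      intro hn
      rw [List.range'_1_concat, List.map_append, List.foldl_append, List.foldl_append,
        ih (by omega)]
      simp only [List.map_cons, List.map_nil, List.foldl_cons, List.foldl_nil]
      have hcast : (((1 + n : Nat) : Int)) - 1 = ((n : Nat) : Int) := by omega
      have hidx : ((m : Int) - ((1 + n : Nat) : Int)) = ((m - (1 + n) : Nat) : Int) := by omega
      rw [hcast, hidx, PySem.List.pyGetD_natCast, PySem.List.pyGetD_natCast,
        List.getD_eq_getElem pl ' ' (by omega),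
        List.getD_eq_getElem srch ' ' (by omega)]
      have hH : pvEnc (pl.take n) * 257 + (pl[n]'(by omega)).toNat = pvEnc (pl.take (n + 1)) := by
        rw [List.take_add_one, List.getElem?_eq_getElem (by omega : n < pl.length)]
        rw [show (some (pl[n]'(by omega))).toList = [pl[n]'(by omega)] from rfl, pvEnc_snoc]
      have hA : (srch[m - (1 + n)]'(by omega)).toNat * 257 ^ n + pvEnc (srch.drop (m - n)) =
          pvEnc (srch.drop (m - (1 + n))) := by
        rw [List.drop_eq_getElem_cons (by omega : m - (1 + n) < srch.length), pvEnc_cons]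
        have h2 : m - (1 + n) + 1 = m - n := by omega
        have h3 : (srch.drop (m - n)).length = n := by rw [List.length_drop]; omega
        rw [h2, h3]
      rw [hH, hA]
      simp only [Int.toNat_natCast, show (1 + n) = n + 1 from Nat.add_comm 1 n, pow_succ]

-- A's scan with early return, as a find? over the (natural) index list
theorem pvALoop_eq_find (srch p : List Char) (js : List Nat) :
    pvALoop srch p (js.map (fun (j : Nat) => (j : Int))) =
      (match js.find? (fun j => decide (srch.drop j = p.take (srch.length - j))) with
       | some j => (srch.length : Int) - (j : Int)
       | none => 0) := by
  induction js with
  | nil => simp [pvALoop]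
  | cons j t ih =>
      simp only [List.map_cons, pvALoop, List.find?]
      rw [PySem.List.slice_from_natCast]
      have hlen : ((srch.drop j).length : Int) = ((srch.length - j : Nat) : Int) := by
        simp
      rw [hlen, PySem.List.slice_to_natCast]
      by_cases hq : srch.drop j = p.take (srch.length - j)
      · simp only [hq, if_true, decide_true]
      · simp only [hq, decide_false, if_false]
        exact ih

theorem pvAsciiCode_lt (s : String) (h : pvDomStr s = true) : ∀ c ∈ s.toList, c.toNat < 257 := by
  intro c hc
  simp only [pvDomStr, List.all_eq_true] at h
  have := h c hc
  simp only [pvDomChar, Bool.or_eq_true, Bool.and_eq_true, decide_eq_true_eq, beq_iff_eq] at this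
  omega

-- encoding equality at admissible k is real equality of the suffix and prefix
theorem pvQ_iff (srch pl : List Char) (m k : Nat) (hsr : srch.length = m)
    (hk : k ≤ m) (hkp : k ≤ pl.length)
    (hcs : ∀ c ∈ srch, c.toNat < 257) (hcp : ∀ c ∈ pl, c.toNat < 257) :
    (pvEnc (srch.drop (m - k)) = pvEnc (pl.take k)) ↔ srch.drop (m - k) = pl.take k := by
  constructor
  · intro he
    apply pvEnc_inj _ _ _ (fun c hc => hcs c (List.mem_of_mem_drop hc))
      (fun c hc => hcp c (List.mem_of_mem_take hc)) he
    rw [List.length_drop, List.length_take, hsr]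
    omega
  · intro h; rw [h]

-- any nonempty suffix-prefix match puts the last character of srch inside pl
theorem pv_match_last_mem (srch pl : List Char) (m k : Nat) (hsr : srch.length = m)
    (h1k : 1 ≤ k) (hk : k ≤ m)
    (hd : srch.drop (m - k) = pl.take k) (hlt : m - 1 < srch.length) :
    srch[m - 1] ∈ pl := by
  have hg := congrArg (fun l => l[k - 1]?) hd
  simp only [List.getElem?_drop] at hg
  have h1 : m - k + (k - 1) = m - 1 := by omega
  rw [h1] at hg
  have h2 : (pl.take k)[k - 1]? = pl[k - 1]? := List.getElem?_take_of_lt (by omega)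
  rw [h2] at hg
  rw [List.getElem?_eq_getElem hlt] at hg
  exact List.mem_of_getElem? hg.symm

-- ===== VERDICT (by name: the statement is the Claim_ definition above) =====
theorem get_longest_suffix_spec : Claim_equal_get_longest_suffix := by
  unfold Claim_equal_get_longest_suffix
  intro s p hdom hpre
  unfold Spec_get_longest_suffix
  obtain ⟨hs0, hp0⟩ := hpre
  have hsl0 : s.toList ≠ [] := fun h => hs0 (by simpa using congrArg String.ofList h)
  have hpl0 : p.toList ≠ [] := fun h => hp0 (by simpa using congrArg String.ofList h)
  set sl := s.toList with hsldef
  set pl := p.toList with hpldef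
  set m := min sl.length pl.length with hmdef
  have hmls : m ≤ sl.length := Nat.min_le_left _ _
  have hmlp : m ≤ pl.length := Nat.min_le_right _ _
  have hm1 : 1 ≤ m := by
    have h1 : 1 ≤ sl.length := List.length_pos_of_ne_nil hsl0
    have h2 : 1 ≤ pl.length := List.length_pos_of_ne_nil hpl0
    omega
  set srch := sl.drop (sl.length - m) with hsrchdef
  have hsrlen : srch.length = m := by rw [hsrchdef, List.length_drop]; omega
  have hdom' : pvDomStr s = true ∧ pvDomStr p = true := by
    simpa [Dom_get_longest_suffix, Bool.and_eq_true] using hdom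
  have hcs : ∀ c ∈ sl, c.toNat < 257 := pvAsciiCode_lt s hdom'.1
  have hcp : ∀ c ∈ pl, c.toNat < 257 := pvAsciiCode_lt p hdom'.2
  have hcsr : ∀ c ∈ srch, c.toNat < 257 := fun c hc => hcs c (List.mem_of_mem_drop hc)
  -- canonical form of B
  have hB : get_longest_suffix_alt s p =
      (((List.range' 1 m).foldl
        (fun b k => if pvEnc (srch.drop (m - k)) = pvEnc (pl.take k) then k else b) 0 : Nat) : Int) := by
    simp only [get_longest_suffix_alt, ← hsldef, ← hpldef, ← hmdef]
    have h1 : ((sl.length : Int) - ((m : Nat) : Int)) = ((sl.length - m : Nat) : Int) := by omega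
    rw [h1, PySem.List.slice_from_natCast, ← hsrchdef]
    have hr : PySem.List.pyRange 1 ((m : Int) + 1) 1 = (List.range' 1 m).map (fun (j : Nat) => (j : Int)) := by
      rw [PySem.List.pyRange_one]
      have h2 : ((m : Int) + 1 - 1).toNat = m := by omega
      rw [h2, List.range'_eq_map_range, List.map_map]
      apply List.map_congr_left
      intro j _
      simp only [Function.comp_apply]
      omega
    rw [hr, pvB_fold srch pl m hsrlen hmlp m le_rfl]
  -- canonical form of A's search slice
  simp only [get_longest_suffix, ← hsldef, ← hpldef]
  have hsearch : PySem.List.slice sl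
      (some (if (sl.length : Int) > (pl.length : Int) then (sl.length : Int) - (pl.length : Int) else 0)) none
      = srch := by
    by_cases hgt : (pl.length : Int) < (sl.length : Int)
    · rw [if_pos hgt]
      have h1 : ((sl.length : Int) - (pl.length : Int)) = ((sl.length - pl.length : Nat) : Int) := by omega
      rw [h1, PySem.List.slice_from_natCast, hsrchdef]
      have : m = pl.length := by omega
      rw [this]
    · rw [if_neg hgt]
      have h0 : (0 : Int) = ((0 : Nat) : Int) := rfl
      rw [h0, PySem.List.slice_from_natCast, List.drop_zero, hsrchdef]
      have : sl.length - m = 0 := by omega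
      rw [this, List.drop_zero]
  rw [hsearch, hsrlen]
  have hget : PySem.List.pyGet? srch ((m : Int) - 1) = some (srch[m - 1]'(by omega)) := by
    have h1 : ((m : Int) - 1) = ((m - 1 : Nat) : Int) := by omega
    rw [h1, PySem.List.pyGet?_natCast, List.getElem?_eq_getElem (by omega)]
  rw [hget]
  dsimp only
  by_cases hmem : srch[m - 1]'(by omega) ∈ pl
  · -- main case: last character occurs in the pattern, A runs its scan
    rw [if_neg (by simp [hmem])]
    have hrange : PySem.List.pyRange 0 (m : Int) 1 = (List.range m).map (fun (j : Nat) => (j : Int)) := by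
      rw [PySem.List.pyRange_one]; simp
    rw [hrange, pvALoop_eq_find, hB,
      pv_last_eq_find (fun k => pvEnc (srch.drop (m - k)) = pvEnc (pl.take k)),
      pv_range'_reverse, List.find?_map]
    simp only [hsrlen]
    have hQ : ∀ j ∈ List.range m,
        ((fun k => decide (pvEnc (srch.drop (m - k)) = pvEnc (pl.take k))) ∘ (fun j => m - j)) j
          = (fun j => decide (srch.drop j = pl.take (m - j))) j := by
      intro j hj
      have hjm : j < m := List.mem_range.mp hj
      simp only [Function.comp_apply]
      have h1 : m - (m - j) = j := by omega
      have hiff := pvQ_iff srch pl m (m - j) hsrlen (by omega) (by omega) hcsr hcp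
      rw [h1] at hiff
      rw [h1]
      exact decide_eq_decide.mpr hiff
    rw [pv_find?_congr _ _ _ hQ]
    cases hfind : (List.range m).find? (fun j => decide (srch.drop j = pl.take (m - j))) with
    | none => simp
    | some j =>
        have hjm : j < m := List.mem_range.mp (List.mem_of_find?_eq_some hfind)
        simp only [Option.map_some, Option.getD_some]
        rw [Nat.cast_sub (le_of_lt hjm)]
  · -- early-return case: last character not in pattern; B's loop never matches either
    rw [if_pos (by simp [hmem]), hB,
      pv_last_eq_find (fun k => pvEnc (srch.drop (m - k)) = pvEnc (pl.take k))]
    have hnone : ((List.range' 1 m).reverse.find?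
        (fun k => decide (pvEnc (srch.drop (m - k)) = pvEnc (pl.take k)))) = none := by
      rw [List.find?_eq_none]
      intro k hk hQk
      have hk' : 1 ≤ k ∧ k ≤ m := by
        rw [List.mem_reverse, List.mem_range'_1] at hk; omega
      have heq : srch.drop (m - k) = pl.take k :=
        (pvQ_iff srch pl m k hsrlen hk'.2 (by omega) hcsr hcp).mp (of_decide_eq_true hQk)
      exact hmem (pv_match_last_mem srch pl m k hsrlen hk'.1 hk'.2 heq (by omega))
    rw [hnone]
    simp
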